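-- pv_equiv track=rewrite | github.com/SaiCode-DEV/Python-Kniffel | kniffel/game_logic/value_calculator.py | get_full_house_value
-- ===== SOURCE A (Python) =====
-- from typing import Dict, List
--
-- FULL_HOUSE_VALUE = 25
--
-- class InvalidThrow(Exception):
--     """
--     Is thrown when a Throw is not plausible meaning a Player tries to cheat
--     or something went wrong
--     """
--
-- def validate_throw(throw: List[int]):
--     """
--     validate throw will check if the passed throw fits the requirements if not
--     a InvalidThrow Exception will be raised
--     @raise InvalidThrow if the throw does not fit requirements
--     """
--     if len(throw) != 5:
--         raise InvalidThrow(
--             f"A throw has to consist of 5 Dice not: {len(throw)}")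
--     for dice in throw:
--         if dice < 1 or dice > 6:
--             raise InvalidThrow(
--                 "In the passed throw is at "
--                 f"least one number not between 1 and 6 got {throw}")
--
-- def get_count_dict(throw: List[int]) -> Dict[int, int]:
--     """
--     Counts the number of occurrences of any dice value in a throw
--     @param throw: a List of dice values
--     @return: a Dict that maps dice values to their occurrences in th throw
--     """
--     counts = {}
--     for dice in throw:
--         if dice in counts:
--             counts[dice] += 1
--         else:
--             counts[dice] = 1
--     return counts
--
-- def get_full_house_value(throw: List[int]) -> int:
--     """
--     Checks if there are three of one kind and two of another kind.
--     If those requirements are fulfilled, the FULL_HOUSE_VALUE is returned otherwise 0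
--     @param throw: a list of dice values
--     @return: FULL_HOUSE_VALUE or 0
--     @raise InvalidThrow if the throw does not fit requirements
--     """
--     validate_throw(throw)
--     counts = get_count_dict(throw)
--     three, two = False, False
--     for _, count in counts.items():
--         if count == 2:
--             two = True
--         if count == 3:
--             three = True
--     if two and three:
--         return FULL_HOUSE_VALUE
--     return 0
-- ===== SOURCE B (Python) =====
-- from typing import List
--
-- FULL_HOUSE_VALUE = 25
--
-- class InvalidThrow(Exception):
--     pass
--
-- def validate_throw(throw: List[int]):
--     if len(throw) != 5:
--         raise InvalidThrow(
--             f"A throw has to consist of 5 Dice not: {len(throw)}")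
--     for dice in throw:
--         if dice < 1 or dice > 6:
--             raise InvalidThrow(
--                 "In the passed throw is at "
--                 f"least one number not between 1 and 6 got {throw}")
--
-- def get_full_house_value(throw: List[int]) -> int:
--     validate_throw(throw)
--     s = sorted(throw)
--     if s[0] == s[1] and s[3] == s[4] and s[0] != s[4] and (s[2] == s[1] or s[2] == s[3]):
--         return FULL_HOUSE_VALUE
--     return 0
-- ===== Notes on version B (the rewrite author's own statement) =====
-- stated objective: idiomatic
-- what changed: Replaces the frequency-dict scan plus boolean flag loop with a sort of the five dice and a positional pattern match (aaabb/aabbb).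
import Mathlib
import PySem

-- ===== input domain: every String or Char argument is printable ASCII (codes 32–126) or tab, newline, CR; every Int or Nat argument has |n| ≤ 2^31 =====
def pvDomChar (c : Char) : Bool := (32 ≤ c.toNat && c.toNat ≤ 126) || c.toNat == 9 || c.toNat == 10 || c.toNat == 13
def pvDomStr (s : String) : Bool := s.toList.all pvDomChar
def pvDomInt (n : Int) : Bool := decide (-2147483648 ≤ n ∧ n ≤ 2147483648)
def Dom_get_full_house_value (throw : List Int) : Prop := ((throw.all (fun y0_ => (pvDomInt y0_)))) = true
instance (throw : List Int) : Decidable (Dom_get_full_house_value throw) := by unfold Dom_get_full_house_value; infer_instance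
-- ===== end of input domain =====

-- B detects a full house by sorting the five dice and matching the positional pattern aaabb/aabbb,
-- instead of A's frequency-dict scan plus flag loop (objective: idiomatic; same InvalidThrow on invalid throws).

-- ===== PORT A =====
-- get_count_dict: counts = {}; for dice in throw: counts[dice] += 1 or = 1
def get_count_dict (throw : List Int) : PySem.Dict Int Int :=
  throw.foldl (fun counts dice =>
    if counts.contains dice then counts.modify dice 0 (· + 1)
    else counts.insert dice 1) PySem.Dict.empty

def get_full_house_value (throw : List Int) : Int :=
  let counts := get_count_dict throw
  -- three, two = False, False; for _, count in counts.items(): set the flags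
  let st := counts.items.foldl (fun (st : Bool × Bool) p =>
    let st' := if p.2 == 2 then (st.1, true) else st
    if p.2 == 3 then (true, st'.2) else st') (false, false)
  if st.2 && st.1 then 25 else 0

-- ===== PORT B =====
def get_full_house_value_alt (throw : List Int) : Int :=
  let s := PySem.List.sorted throw (fun x => x) false
  -- s[0..4] are in range under Pre_ (length = 5, enforced by validate_throw)
  if PySem.List.pyGetD s 0 0 == PySem.List.pyGetD s 1 0
     && PySem.List.pyGetD s 3 0 == PySem.List.pyGetD s 4 0
     && PySem.List.pyGetD s 0 0 != PySem.List.pyGetD s 4 0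
     && (PySem.List.pyGetD s 2 0 == PySem.List.pyGetD s 1 0
         || PySem.List.pyGetD s 2 0 == PySem.List.pyGetD s 3 0)
  then 25 else 0

-- ===== PRECONDITION & SPEC =====
-- validate_throw raises InvalidThrow unless there are exactly 5 dice, all between 1 and 6
def Pre_get_full_house_value (throw : List Int) : Prop :=
  throw.length = 5 ∧ ∀ d ∈ throw, 1 ≤ d ∧ d ≤ 6
instance (throw : List Int) : Decidable (Pre_get_full_house_value throw) := by
  unfold Pre_get_full_house_value; infer_instance
def pvWitness_get_full_house_value : List Int := [2, 3, 2, 3, 3]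

def Spec_get_full_house_value (throw : List Int) (out : Int) : Prop := out = get_full_house_value_alt throw
instance (throw : List Int) (out : Int) : Decidable (Spec_get_full_house_value throw out) := by unfold Spec_get_full_house_value; infer_instance

-- ===== CLAIM (what is proved, stated in full; the proofs are below) =====
def Claim_equal_get_full_house_value : Prop := ∀ (throw : List Int), Dom_get_full_house_value throw → Pre_get_full_house_value throw → Spec_get_full_house_value throw (get_full_house_value throw)

-- ===== LEMMAS AND PROOFS =====

-- A's branch "if dice in counts: counts[dice] += 1 else: counts[dice] = 1" is Counter's update step
lemma step_eq (counts : PySem.Dict Int Int) (dice : Int) :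
    (if counts.contains dice then counts.modify dice 0 (· + 1)
     else counts.insert dice 1) = counts.modify dice 0 (· + 1) := by
  by_cases h : counts.contains dice = true
  · simp [h]
  · simp only [Bool.not_eq_true] at h
    simp only [h, Bool.false_eq_true, ↓reduceIte, PySem.Dict.insert,
      PySem.Dict.modify, PySem.Dict.get?_eq_none_iff_contains, PySem.Dict.getD_of_get?_eq_none, zero_add]

lemma count_dict_eq (throw : List Int) : get_count_dict throw = PySem.Dict.counter throw := by
  unfold get_count_dict
  rw [PySem.Dict.counter_eq_foldl]
  congr 1
  funext c d
  exact step_eq c d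

-- A's flag loop computes "some count is 3" and "some count is 2"
lemma flags (l : List (Int × Int)) (s : Bool × Bool) :
    l.foldl (fun (st : Bool × Bool) p =>
      let st' := if p.2 == 2 then (st.1, true) else st
      if p.2 == 3 then (true, st'.2) else st') s
    = (s.1 || l.any (fun p => p.2 == 3), s.2 || l.any (fun p => p.2 == 2)) := by
  induction l generalizing s with
  | nil => simp
  | cons p l ih =>
    rw [List.foldl_cons, ih]
    have e2 : (p.2 == 2) = (decide (p.2 = 2)) := rfl
    have e3 : (p.2 == 3) = (decide (p.2 = 3)) := rfl
    by_cases h2 : p.2 = 2 <;> by_cases h3 : p.2 = 3 <;>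
      simp [e2, e3, h2, h3, Bool.or_comm]

-- A returns 25 exactly when some die occurs 3 times and some die occurs twice
lemma A_char (throw : List Int) :
    get_full_house_value throw =
      if (∃ x ∈ throw, (throw.count x : Int) = 3) ∧ (∃ x ∈ throw, (throw.count x : Int) = 2) then 25 else 0 := by
  simp only [get_full_house_value]
  rw [count_dict_eq, flags, PySem.Dict.items_counter]
  simp only [List.any_map, Bool.false_or]
  have hmem : ∀ (p : Int → Bool), ((PySem.Set.ofList throw).any p) = throw.any p := by
    intro p
    apply Bool.eq_iff_iff.mpr
    simp [List.any_eq_true, PySem.Set.mem_ofList]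
  simp only [hmem]
  by_cases h3 : (∃ x ∈ throw, (throw.count x : Int) = 3) <;>
    by_cases h2 : (∃ x ∈ throw, (throw.count x : Int) = 2) <;>
      simp_all [List.any_eq_true, and_comm]

-- A's value only depends on the multiset of dice
lemma A_perm {l l' : List Int} (h : l.Perm l') :
    get_full_house_value l = get_full_house_value l' := by
  have hc : ∀ n : Int, (∃ x ∈ l, (l.count x : Int) = n) ↔ (∃ x ∈ l', (l'.count x : Int) = n) := by
    intro n
    constructor <;> rintro ⟨x, hx, hcx⟩
    · exact ⟨x, h.mem_iff.mp hx, by rw [← h.count_eq]; exact hcx⟩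
    · exact ⟨x, h.mem_iff.mpr hx, by rw [h.count_eq]; exact hcx⟩
  rw [A_char, A_char, if_congr (and_congr (hc 3) (hc 2)) rfl rfl]

def pvDice : List Int := [1, 2, 3, 4, 5, 6]

lemma pv_mem_dice {a : Int} (h1 : 1 ≤ a) (h2 : a ≤ 6) : a ∈ pvDice := by
  interval_cases a <;> simp [pvDice]

-- exhaustive check over the 252 sorted throws (A is permutation-invariant, B only reads sorted throw)
lemma pv_exhaustive : ∀ a ∈ pvDice, ∀ b ∈ pvDice, ∀ c ∈ pvDice, ∀ d ∈ pvDice, ∀ e ∈ pvDice,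
    a ≤ b → b ≤ c → c ≤ d → d ≤ e →
    get_full_house_value [a, b, c, d, e] = get_full_house_value_alt [a, b, c, d, e] := by
  decide

-- ===== VERDICT (by name: the statement is the Claim_ definition above) =====
theorem get_full_house_value_spec : Claim_equal_get_full_house_value := by
  intro throw _ hPre
  obtain ⟨hlen, hmem⟩ := hPre
  have hperm : (PySem.List.sorted throw (fun x => x) false).Perm throw :=
    PySem.List.sorted_perm throw (fun x => x) false
  have hlens : (PySem.List.sorted throw (fun x => x) false).length = 5 := by
    rw [hperm.length_eq, hlen]
  have hex : ∃ a b c d e, PySem.List.sorted throw (fun x => x) false = [a, b, c, d, e] := by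
    match hs : PySem.List.sorted throw (fun x => x) false, hlens with
    | [a, b, c, d, e], _ => exact ⟨a, b, c, d, e, rfl⟩
  obtain ⟨a, b, c, d, e, hs⟩ := hex
  have hpw := PySem.List.sorted_pairwise throw (fun x => x)
  rw [hs] at hpw
  simp only [List.pairwise_cons, List.mem_cons, List.not_mem_nil] at hpw
  have hb : ∀ x ∈ ([a, b, c, d, e] : List Int), 1 ≤ x ∧ x ≤ 6 := by
    intro x hx
    exact hmem x (hperm.mem_iff.mp (hs ▸ hx))
  have ha' := hb a (by simp); have hb' := hb b (by simp); have hc' := hb c (by simp)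
  have hd' := hb d (by simp); have he' := hb e (by simp)
  have hAB : get_full_house_value [a, b, c, d, e] = get_full_house_value_alt [a, b, c, d, e] :=
    pv_exhaustive a (pv_mem_dice ha'.1 ha'.2) b (pv_mem_dice hb'.1 hb'.2)
      c (pv_mem_dice hc'.1 hc'.2) d (pv_mem_dice hd'.1 hd'.2) e (pv_mem_dice he'.1 he'.2)
      (hpw.1 b (Or.inl rfl)) (hpw.2.1 c (Or.inl rfl)) (hpw.2.2.1 d (Or.inl rfl)) (hpw.2.2.2.1 e (Or.inl rfl))
  show get_full_house_value throw = get_full_house_value_alt throw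
  rw [A_perm (hs ▸ hperm.symm), hAB]
  simp only [get_full_house_value_alt]
  rw [← hs, PySem.List.sorted_sorted]
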